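-- pv_equiv track=rewrite | github.com/KamisAyaka/introduction-data-science | 第二章/1.py | maxProductList
-- ===== SOURCE A (Python) =====
-- def maxProductList(n):
--     dp = [0] * (n + 1)
--     result = [[] for _ in range(n + 1)]
--     dp[1] = 1
--     result[1] = [1]
--     for i in range(2, n + 1):
--         max_product = 0
--         max_j = 0
--         for j in range(1, i // 2 + 1):
--             current_product = dp[j] * dp[i - j]
--             if current_product > max_product:
--                 max_product = current_product
--                 max_j = j
--         if max_product > i:
--             dp[i] = max_product
--             result[i] = result[max_j] + result[i - max_j]
--         else:
--             dp[i] = i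
--             result[i] = [i]
--     return result[n]
-- ===== SOURCE B (Python) =====
-- def maxProductList(n):
--     # Closed form: for n >= 5 the optimal decomposition is 3s plus at most two 2s,
--     # chosen by n mod 3; for n <= 4 the number itself beats any split.
--     if n <= 4:
--         return [n]
--     r = n % 3
--     if r == 0:
--         return [3] * (n // 3)
--     if r == 1:
--         return [2, 2] + [3] * ((n - 4) // 3)
--     return [2] + [3] * ((n - 2) // 3)
-- ===== Notes on version B (the rewrite author's own statement) =====
-- stated objective: faster
-- what changed: Replaced the O(n^2) dynamic program over all split points with the closed-form modular rule (all 3s plus at most two 2s, base cases n<=4) that builds the factor list directly in O(n) output size.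
import Mathlib
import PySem

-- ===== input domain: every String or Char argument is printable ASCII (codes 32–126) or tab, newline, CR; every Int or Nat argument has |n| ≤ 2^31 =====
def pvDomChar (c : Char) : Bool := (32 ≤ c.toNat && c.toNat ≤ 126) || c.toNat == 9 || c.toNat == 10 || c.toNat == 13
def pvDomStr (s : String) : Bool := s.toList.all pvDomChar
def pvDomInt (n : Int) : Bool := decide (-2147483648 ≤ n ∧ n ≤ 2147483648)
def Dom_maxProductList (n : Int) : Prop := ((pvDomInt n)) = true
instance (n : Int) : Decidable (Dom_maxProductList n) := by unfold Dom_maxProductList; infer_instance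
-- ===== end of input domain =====

-- B replaces A's O(n^2) dynamic program by the closed-form 2s-and-3s modular rule (faster, O(n) output construction).

-- ===== PORT A =====
-- Python list indexing dp[j] / result[j] is ported as `.getD (·.toNat) default`: on every input
-- admitted by Pre_ all reads and writes are at nonnegative in-range indices, where this is exact.
-- inner loop: for j in range(1, i//2+1): track (max_product, max_j)
def pvInnerA (dp : List Int) (i : Int) : Int × Int :=
  (PySem.List.pyRange 1 (PySem.Int.floordiv i 2 + 1) 1).foldl
    (fun mm j =>
      let c := dp.getD j.toNat 0 * dp.getD (i - j).toNat 0
      if c > mm.1 then (c, j) else mm)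
    (0, 0)

-- body of the outer loop: for i in range(2, n+1)
def pvStepA (st : List Int × List (List Int)) (i : Int) : List Int × List (List Int) :=
  let mm := pvInnerA st.1 i
  if mm.1 > i then
    (st.1.set i.toNat mm.1,
     st.2.set i.toNat (st.2.getD mm.2.toNat [] ++ st.2.getD (i - mm.2).toNat []))
  else
    (st.1.set i.toNat i, st.2.set i.toNat [i])

def maxProductList (n : Int) : List Int :=
  let dp : List Int := (List.replicate (n + 1).toNat 0).set 1 1
  let result : List (List Int) := (List.replicate (n + 1).toNat []).set 1 [1]
  (((PySem.List.pyRange 2 (n + 1) 1).foldl pvStepA (dp, result)).2).getD n.toNat []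

-- ===== PORT B =====
def maxProductList_alt (n : Int) : List Int :=
  if n ≤ 4 then [n]
  else
    let r := PySem.Int.mod n 3
    if r = 0 then List.replicate (PySem.Int.floordiv n 3).toNat 3
    else if r = 1 then [2, 2] ++ List.replicate (PySem.Int.floordiv (n - 4) 3).toNat 3
    else [2] ++ List.replicate (PySem.Int.floordiv (n - 2) 3).toNat 3

-- ===== PRECONDITION & SPEC =====
-- A raises IndexError for every n ≤ 0 (dp[1] = 1 on a list of length ≤ 1); those inputs are excluded.
def Pre_maxProductList (n : Int) : Prop := 1 ≤ n
instance (n : Int) : Decidable (Pre_maxProductList n) := by unfold Pre_maxProductList; infer_instance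
def pvWitness_maxProductList : Int := 6

def Spec_maxProductList (n : Int) (out : List Int) : Prop := out = maxProductList_alt n
instance (n : Int) (out : List Int) : Decidable (Spec_maxProductList n out) := by unfold Spec_maxProductList; infer_instance

-- ===== CLAIM (what is proved, stated in full; the proofs are below) =====
def Claim_equal_maxProductList : Prop := ∀ (n : Int), Dom_maxProductList n → Pre_maxProductList n → Spec_maxProductList n (maxProductList n)

-- ===== LEMMAS AND PROOFS =====

-- p k = the value dp[k] holds in A (the maximal product for k, with p k = k for k ≤ 4).
def pvP : Nat → Int
  | 0 => 0
  | 1 => 1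
  | 2 => 2
  | 3 => 3
  | 4 => 4
  | (k + 5) => 3 * pvP (k + 2)

-- f k = the list result[k] holds in A (= B's closed form).
def pvF (k : Nat) : List Int :=
  if k ≤ 4 then [(k : Int)]
  else if k % 3 = 0 then List.replicate (k / 3) 3
  else if k % 3 = 1 then 2 :: 2 :: List.replicate ((k - 4) / 3) 3
  else 2 :: List.replicate ((k - 2) / 3) 3

lemma pvP_step (m : Nat) : pvP (m + 5) = 3 * pvP (m + 2) := rfl

lemma pvP_forms (t : Nat) :
    pvP (3 * t + 2) = 2 * 3 ^ t ∧ pvP (3 * t + 3) = 3 * 3 ^ t ∧ pvP (3 * t + 4) = 4 * 3 ^ t := by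
  induction t with
  | zero => refine ⟨rfl, rfl, rfl⟩
  | succ t ih =>
    obtain ⟨h2, h3, h4⟩ := ih
    refine ⟨?_, ?_, ?_⟩
    · have e : 3 * (t + 1) + 2 = (3 * t) + 5 := by ring
      rw [e, pvP_step, show 3 * t + 2 = 3 * t + 2 from rfl, h2]; ring
    · have e : 3 * (t + 1) + 3 = (3 * t + 1) + 5 := by ring
      rw [e, pvP_step, show 3 * t + 1 + 2 = 3 * t + 3 from by ring, h3]; ring
    · have e : 3 * (t + 1) + 4 = (3 * t + 2) + 5 := by ring
      rw [e, pvP_step, show 3 * t + 2 + 2 = 3 * t + 4 from by ring, h4]; ring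

lemma pvPow3 (t : Nat) : (t : Int) + 1 ≤ 3 ^ t := by
  induction t with
  | zero => norm_num
  | succ t ih =>
    have h3 : (3:Int) ^ (t+1) = 3 * 3 ^ t := by ring
    push_cast
    nlinarith [ih]

lemma pvP_gt (k : Nat) (hk : 5 ≤ k) : (k : Int) < pvP k := by
  obtain ⟨t, ht⟩ : ∃ t, k = 3 * t + 5 ∨ k = 3 * t + 6 ∨ k = 3 * t + 7 := ⟨(k - 5) / 3, by omega⟩
  have hp := pvPow3 t
  rcases ht with h | h | h <;> subst h
  · have := (pvP_forms (t + 1)).1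
    rw [show 3 * (t + 1) + 2 = 3 * t + 5 from by ring] at this
    rw [this]; have h3 : (3:Int) ^ (t+1) = 3 * 3 ^ t := by ring
    push_cast; nlinarith
  · have := (pvP_forms (t + 1)).2.1
    rw [show 3 * (t + 1) + 3 = 3 * t + 6 from by ring] at this
    rw [this]; have h3 : (3:Int) ^ (t+1) = 3 * 3 ^ t := by ring
    push_cast; nlinarith
  · have := (pvP_forms (t + 1)).2.2
    rw [show 3 * (t + 1) + 4 = 3 * t + 7 from by ring] at this
    rw [this]; have h3 : (3:Int) ^ (t+1) = 3 * 3 ^ t := by ring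
    push_cast; nlinarith

-- superadditivity: pvP a * pvP b ≤ pvP (a+b)
lemma pvP_mul_le_aux : ∀ s a b : Nat, a + b ≤ s → 1 ≤ a → 1 ≤ b → pvP a * pvP b ≤ pvP (a + b) := by
  intro s
  induction s with
  | zero => intro a b h ha hb; omega
  | succ s ih =>
    intro a b h ha hb
    by_cases ha5 : 5 ≤ a
    · have hpa : pvP a = 3 * pvP (a - 3) := by
        have hs := pvP_step (a - 5)
        rw [show a - 5 + 5 = a from by omega, show a - 5 + 2 = a - 3 from by omega] at hs
        exact hs
      have hpab : pvP (a + b) = 3 * pvP ((a - 3) + b) := by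
        have hs := pvP_step (a + b - 5)
        rw [show a + b - 5 + 5 = a + b from by omega, show a + b - 5 + 2 = (a - 3) + b from by omega] at hs
        exact hs
      rw [hpa, hpab]
      have hih := ih (a - 3) b (by omega) (by omega) hb
      nlinarith [hih]
    · by_cases hb5 : 5 ≤ b
      · have hpb : pvP b = 3 * pvP (b - 3) := by
          have hs := pvP_step (b - 5)
          rw [show b - 5 + 5 = b from by omega, show b - 5 + 2 = b - 3 from by omega] at hs
          exact hs
        have hpab : pvP (a + b) = 3 * pvP (a + (b - 3)) := by
          have hs := pvP_step (a + b - 5)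
          rw [show a + b - 5 + 5 = a + b from by omega, show a + b - 5 + 2 = a + (b - 3) from by omega] at hs
          exact hs
        rw [hpb, hpab]
        have hih := ih a (b - 3) (by omega) ha (by omega)
        nlinarith [hih]
      · interval_cases a <;> interval_cases b <;> decide

lemma pvP_mul_le (a b : Nat) (ha : 1 ≤ a) (hb : 1 ≤ b) : pvP a * pvP b ≤ pvP (a + b) :=
  pvP_mul_le_aux (a + b) a b le_rfl ha hb

-- the pure inner-loop body over pvP
def pvC (i j : Int) : Int := pvP j.toNat * pvP (i - j).toNat

lemma pvAbsorb (c : Int → Int) (L : List Int) (M j0 : Int) (h : ∀ j ∈ L, c j ≤ M) :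
    L.foldl (fun mm j => if c j > mm.1 then (c j, j) else mm) (M, j0) = (M, j0) := by
  induction L with
  | nil => rfl
  | cons a L ih =>
    have h1 : ¬ (c a > M) := not_lt.mpr (h a (List.mem_cons_self))
    simp only [List.foldl_cons, h1, if_false]
    exact ih (fun j hj => h j (List.mem_cons_of_mem _ hj))

lemma pvInner_pure (i : Int) (hi : 5 ≤ i) :
    (PySem.List.pyRange 1 (PySem.Int.floordiv i 2 + 1) 1).foldl
      (fun mm j => if pvC i j > mm.1 then (pvC i j, j) else mm) ((0:Int), (0:Int))
    = (pvP i.toNat, if (3:Int) ∣ i then 3 else 2) := by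
  rw [PySem.Int.floordiv_eq_ediv_of_pos (by norm_num)]
  obtain ⟨t, ht⟩ : ∃ t : Nat, i = 3 * (t:Int) + 5 ∨ i = 3 * (t:Int) + 6 ∨ i = 3 * (t:Int) + 7 :=
    ⟨(i.toNat - 5) / 3, by omega⟩
  have hpow : (0:Int) < 3 ^ t := by positivity
  have habsorb : ∀ (a M j0 : Int), M = pvP i.toNat → 3 ≤ a →
      (PySem.List.pyRange a (i / 2 + 1) 1).foldl
        (fun mm j => if pvC i j > mm.1 then (pvC i j, j) else mm) (M, j0) = (M, j0) := by
    intro a M j0 hM ha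
    apply pvAbsorb
    intro j hj
    rw [PySem.List.mem_pyRange_one] at hj
    have hle := pvP_mul_le j.toNat (i - j).toNat (by omega) (by omega)
    rw [show j.toNat + (i - j).toNat = i.toNat from by omega] at hle
    rw [hM]
    exact hle
  rcases ht with h | h | h
  · -- i ≡ 2 (mod 3): max_j = 2, first strict improvement at j = 2
    have hpi : pvP i.toNat = 6 * 3 ^ t := by
      rw [show i.toNat = 3 * (t + 1) + 2 from by omega, (pvP_forms (t + 1)).1]; ring
    have hc1 : pvC i 1 = 4 * 3 ^ t := by
      unfold pvC
      rw [show ((1:Int)).toNat = 1 from rfl, show (i - 1).toNat = 3 * t + 4 from by omega,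
         (pvP_forms t).2.2, show pvP 1 = 1 from rfl]
      ring
    have hc2 : pvC i 2 = 6 * 3 ^ t := by
      unfold pvC
      rw [show ((2:Int)).toNat = 2 from rfl, show (i - 2).toNat = 3 * t + 3 from by omega,
         (pvP_forms t).2.1, show pvP 2 = 2 from rfl]
      ring
    rw [if_neg (by omega : ¬ (3:Int) ∣ i)]
    rw [PySem.List.pyRange_one_append 1 3 (i / 2 + 1) (by norm_num) (by omega),
       show PySem.List.pyRange 1 3 1 = [1, 2] from by decide, List.foldl_append,
       List.foldl_cons, List.foldl_cons, List.foldl_nil]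
    rw [show (if pvC i 1 > ((0:Int), (0:Int)).1 then (pvC i 1, (1:Int)) else ((0:Int), (0:Int)))
        = (4 * 3 ^ t, 1) from by rw [hc1]; exact if_pos (by positivity)]
    rw [show (if pvC i 2 > ((4 * 3 ^ t : Int), (1:Int)).1 then (pvC i 2, (2:Int)) else (4 * 3 ^ t, 1))
        = (6 * 3 ^ t, 2) from by rw [hc2]; exact if_pos (by simp)]
    rw [← hpi]
    exact habsorb 3 _ 2 rfl le_rfl
  · -- i ≡ 0 (mod 3): max_j = 3, updates at j = 1, 2, 3
    have hpi : pvP i.toNat = 9 * 3 ^ t := by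
      rw [show i.toNat = 3 * (t + 1) + 3 from by omega, (pvP_forms (t + 1)).2.1]; ring
    have hc1 : pvC i 1 = 6 * 3 ^ t := by
      unfold pvC
      rw [show ((1:Int)).toNat = 1 from rfl, show (i - 1).toNat = 3 * (t + 1) + 2 from by omega,
         (pvP_forms (t + 1)).1, show pvP 1 = 1 from rfl]
      ring
    have hc2 : pvC i 2 = 8 * 3 ^ t := by
      unfold pvC
      rw [show ((2:Int)).toNat = 2 from rfl, show (i - 2).toNat = 3 * t + 4 from by omega,
         (pvP_forms t).2.2, show pvP 2 = 2 from rfl]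
      ring
    have hc3 : pvC i 3 = 9 * 3 ^ t := by
      unfold pvC
      rw [show ((3:Int)).toNat = 3 from rfl, show (i - 3).toNat = 3 * t + 3 from by omega,
         (pvP_forms t).2.1, show pvP 3 = 3 from rfl]
      ring
    rw [if_pos (by omega : (3:Int) ∣ i)]
    rw [PySem.List.pyRange_one_append 1 4 (i / 2 + 1) (by norm_num) (by omega),
       show PySem.List.pyRange 1 4 1 = [1, 2, 3] from by decide, List.foldl_append,
       List.foldl_cons, List.foldl_cons, List.foldl_cons, List.foldl_nil]
    rw [show (if pvC i 1 > ((0:Int), (0:Int)).1 then (pvC i 1, (1:Int)) else ((0:Int), (0:Int)))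
        = (6 * 3 ^ t, 1) from by rw [hc1]; exact if_pos (by positivity)]
    rw [show (if pvC i 2 > ((6 * 3 ^ t : Int), (1:Int)).1 then (pvC i 2, (2:Int)) else (6 * 3 ^ t, 1))
        = (8 * 3 ^ t, 2) from by rw [hc2]; exact if_pos (by simp)]
    rw [show (if pvC i 3 > ((8 * 3 ^ t : Int), (2:Int)).1 then (pvC i 3, (3:Int)) else (8 * 3 ^ t, 2))
        = (9 * 3 ^ t, 3) from by rw [hc3]; exact if_pos (by simp)]
    rw [← hpi]
    exact habsorb 4 _ 3 rfl (by norm_num)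
  · -- i ≡ 1 (mod 3): max_j = 2
    have hpi : pvP i.toNat = 12 * 3 ^ t := by
      rw [show i.toNat = 3 * (t + 1) + 4 from by omega, (pvP_forms (t + 1)).2.2]; ring
    have hc1 : pvC i 1 = 9 * 3 ^ t := by
      unfold pvC
      rw [show ((1:Int)).toNat = 1 from rfl, show (i - 1).toNat = 3 * (t + 1) + 3 from by omega,
         (pvP_forms (t + 1)).2.1, show pvP 1 = 1 from rfl]
      ring
    have hc2 : pvC i 2 = 12 * 3 ^ t := by
      unfold pvC
      rw [show ((2:Int)).toNat = 2 from rfl, show (i - 2).toNat = 3 * (t + 1) + 2 from by omega,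
         (pvP_forms (t + 1)).1, show pvP 2 = 2 from rfl]
      ring
    rw [if_neg (by omega : ¬ (3:Int) ∣ i)]
    rw [PySem.List.pyRange_one_append 1 3 (i / 2 + 1) (by norm_num) (by omega),
       show PySem.List.pyRange 1 3 1 = [1, 2] from by decide, List.foldl_append,
       List.foldl_cons, List.foldl_cons, List.foldl_nil]
    rw [show (if pvC i 1 > ((0:Int), (0:Int)).1 then (pvC i 1, (1:Int)) else ((0:Int), (0:Int)))
        = (9 * 3 ^ t, 1) from by rw [hc1]; exact if_pos (by positivity)]
    rw [show (if pvC i 2 > ((9 * 3 ^ t : Int), (1:Int)).1 then (pvC i 2, (2:Int)) else (9 * 3 ^ t, 1))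
        = (12 * 3 ^ t, 2) from by rw [hc2]; exact if_pos (by simp)]
    rw [← hpi]
    exact habsorb 3 _ 2 rfl le_rfl

-- invariant of the outer loop after processing all i < m
def pvInv (n m : Nat) (st : List Int × List (List Int)) : Prop :=
  st.1.length = n + 1 ∧ st.2.length = n + 1 ∧
  ∀ k : Nat, 1 ≤ k → k < m → k ≤ n → st.1.getD k 0 = pvP k ∧ st.2.getD k [] = pvF k

lemma pvInnerA_eq (dp : List Int) (i : Int) (hi : 2 ≤ i)
    (h : ∀ k : Nat, 1 ≤ k → k < i.toNat → dp.getD k 0 = pvP k) :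
    pvInnerA dp i =
      (PySem.List.pyRange 1 (PySem.Int.floordiv i 2 + 1) 1).foldl
        (fun mm j => if pvC i j > mm.1 then (pvC i j, j) else mm) ((0:Int), (0:Int)) := by
  unfold pvInnerA
  apply PySem.List.foldl_congr_mem
  intro mm j hj
  rw [PySem.Int.floordiv_eq_ediv_of_pos (by norm_num)] at hj
  rw [PySem.List.mem_pyRange_one] at hj
  have hj1 : 1 ≤ j := hj.1
  have hj2 : j ≤ i / 2 := by omega
  have e1 : dp.getD j.toNat 0 = pvP j.toNat := h j.toNat (by omega) (by omega)
  have e2 : dp.getD (i - j).toNat 0 = pvP (i - j).toNat := h (i - j).toNat (by omega) (by omega)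
  simp only [pvC, e1, e2]

-- f splits as A's result[max_j] + result[i - max_j]
lemma pvF_rep0 (k : Nat) (h3 : 3 ≤ k) (hm : k % 3 = 0) : pvF k = List.replicate (k / 3) 3 := by
  by_cases h : k ≤ 4
  · have : k = 3 := by omega
    subst this; rfl
  · simp only [pvF, if_neg h, hm]; norm_num

lemma pvF_rep2 (k : Nat) (h2 : 2 ≤ k) (hm : k % 3 = 2) : pvF k = 2 :: List.replicate ((k - 2) / 3) 3 := by
  by_cases h : k ≤ 4
  · have : k = 2 := by omega
    subst this; rfl
  · simp only [pvF, if_neg h, hm]; norm_num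

lemma pvF_rep1 (k : Nat) (h7 : 7 ≤ k) (hm : k % 3 = 1) : pvF k = 2 :: 2 :: List.replicate ((k - 4) / 3) 3 := by
  simp only [pvF, if_neg (by omega : ¬ k ≤ 4), hm]; norm_num

lemma pvF_split (k : Nat) (hk : 5 ≤ k) :
    pvF ((if k % 3 = 0 then 3 else 2)) ++ pvF (k - (if k % 3 = 0 then 3 else 2)) = pvF k := by
  have hm3 : k % 3 = 0 ∨ k % 3 = 1 ∨ k % 3 = 2 := by omega
  rcases hm3 with hm | hm | hm
  · simp only [hm]
    norm_num
    rw [pvF_rep0 k (by omega) hm, pvF_rep0 (k - 3) (by omega) (by omega)]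
    have : pvF 3 = [3] := rfl
    rw [this]
    rw [show k / 3 = (k - 3) / 3 + 1 from by omega, List.replicate_succ]
    rfl
  · simp only [hm]
    norm_num
    rw [pvF_rep1 k (by omega) hm, pvF_rep2 (k - 2) (by omega) (by omega)]
    have : pvF 2 = [2] := rfl
    rw [this, show k - 2 - 2 = k - 4 from by omega]
    rfl
  · simp only [hm]
    norm_num
    rw [pvF_rep2 k (by omega) hm, pvF_rep0 (k - 2) (by omega) (by omega)]
    have : pvF 2 = [2] := rfl
    rw [this]
    rfl

lemma pvGetD_set_self {α : Type} (l : List α) (a : Nat) (v d : α) (h : a < l.length) :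
    (l.set a v).getD a d = v := by
  simp [List.getD, List.getElem?_set_self h]

lemma pvGetD_set_ne {α : Type} (l : List α) (a k : Nat) (v d : α) (h : a ≠ k) :
    (l.set a v).getD k d = l.getD k d := by
  simp [List.getD, List.getElem?_set_ne h]

lemma pvStep_preserves (n : Nat) (i : Int) (hi2 : 2 ≤ i) (hin : i.toNat ≤ n)
    (st : List Int × List (List Int)) (h : pvInv n i.toNat st) :
    pvInv n (i.toNat + 1) (pvStepA st i) := by
  obtain ⟨hl1, hl2, hk⟩ := h
  have hdp : ∀ k : Nat, 1 ≤ k → k < i.toNat → st.1.getD k 0 = pvP k :=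
    fun k h1 h2 => (hk k h1 h2 (by omega)).1
  have hinner := pvInnerA_eq st.1 i hi2 hdp
  simp only [pvStepA, hinner]
  by_cases h5 : 5 ≤ i
  · rw [pvInner_pure i h5]
    have hgt : pvP i.toNat > i := by
      have hg := pvP_gt i.toNat (by omega)
      have hc : ((i.toNat : Nat) : Int) = i := by omega
      rw [hc] at hg
      exact hg
    rw [if_pos hgt]
    refine ⟨by simp [hl1], by simp [hl2], ?_⟩
    intro k h1 h2 h3
    by_cases hki : k = i.toNat
    · subst hki
      constructor
      · rw [pvGetD_set_self _ _ _ _ (by omega)]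
      · rw [pvGetD_set_self _ _ _ _ (by omega)]
        have hdvd : (3:Int) ∣ i ↔ i.toNat % 3 = 0 := by omega
        by_cases h3i : (3:Int) ∣ i
        · rw [if_pos h3i]
          have e3 : ((3:Int)).toNat = 3 := rfl
          rw [e3, show (i - 3).toNat = i.toNat - 3 from by omega,
             (hk 3 (by omega) (by omega) (by omega)).2,
             (hk (i.toNat - 3) (by omega) (by omega) (by omega)).2]
          have := pvF_split i.toNat (by omega)
          rwa [if_pos (hdvd.mp h3i)] at this
        · rw [if_neg h3i]
          have e2 : ((2:Int)).toNat = 2 := rfl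
          rw [e2, show (i - 2).toNat = i.toNat - 2 from by omega,
             (hk 2 (by omega) (by omega) (by omega)).2,
             (hk (i.toNat - 2) (by omega) (by omega) (by omega)).2]
          have := pvF_split i.toNat (by omega)
          rwa [if_neg (fun hc => h3i (hdvd.mpr hc))] at this
    · rw [pvGetD_set_ne _ _ _ _ _ (fun hc => hki hc.symm),
         pvGetD_set_ne _ _ _ _ _ (fun hc => hki hc.symm)]
      exact hk k h1 (by omega) h3
  · -- i = 2, 3 or 4: the inner maximum does not beat i, so A stores i and [i]
    have hi234 : i = 2 ∨ i = 3 ∨ i = 4 := by omega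
    have hfin : ∀ v : Int, v = i →
        pvP i.toNat = v ∧ pvF i.toNat = [v] →
        pvInv n (i.toNat + 1)
          (st.1.set i.toNat v, st.2.set i.toNat [v]) := by
      intro v hv ⟨hpv, hfv⟩
      refine ⟨by simp [hl1], by simp [hl2], ?_⟩
      intro k h1 h2 h3
      by_cases hki : k = i.toNat
      · subst hki
        exact ⟨by rw [pvGetD_set_self _ _ _ _ (by omega), hpv],
               by rw [pvGetD_set_self _ _ _ _ (by omega), hfv]⟩
      · rw [pvGetD_set_ne _ _ _ _ _ (fun hc => hki hc.symm),
           pvGetD_set_ne _ _ _ _ _ (fun hc => hki hc.symm)]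
        exact hk k h1 (by omega) h3
    rcases hi234 with h | h | h <;> subst h
    · rw [show (PySem.List.pyRange 1 (PySem.Int.floordiv 2 2 + 1) 1).foldl
          (fun mm j => if pvC 2 j > mm.1 then (pvC 2 j, j) else mm) ((0:Int), (0:Int)) = (1, 1)
          from by decide, if_neg (by norm_num)]
      exact hfin 2 rfl ⟨rfl, rfl⟩
    · rw [show (PySem.List.pyRange 1 (PySem.Int.floordiv 3 2 + 1) 1).foldl
          (fun mm j => if pvC 3 j > mm.1 then (pvC 3 j, j) else mm) ((0:Int), (0:Int)) = (2, 1)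
          from by decide, if_neg (by norm_num)]
      exact hfin 3 rfl ⟨rfl, rfl⟩
    · rw [show (PySem.List.pyRange 1 (PySem.Int.floordiv 4 2 + 1) 1).foldl
          (fun mm j => if pvC 4 j > mm.1 then (pvC 4 j, j) else mm) ((0:Int), (0:Int)) = (4, 2)
          from by decide, if_neg (by norm_num)]
      exact hfin 4 rfl ⟨rfl, rfl⟩

lemma pvFold_inv (n : Nat) (hn : 1 ≤ n) :
    ∀ t : Nat, 2 + t ≤ n + 1 →
      pvInv n (2 + t)
        ((PySem.List.pyRange 2 ((2 + t : Nat) : Int) 1).foldl pvStepA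
          ((List.replicate (n + 1) (0:Int)).set 1 1, (List.replicate (n + 1) ([] : List Int)).set 1 [1])) := by
  intro t
  induction t with
  | zero =>
    intro _
    rw [show (((2 + 0 : Nat) : Nat) : Int) = 2 from by norm_num,
       PySem.List.pyRange_one_eq_nil le_rfl, List.foldl_nil]
    refine ⟨by simp, by simp, ?_⟩
    intro k h1 h2 h3
    have hk1 : k = 1 := by omega
    subst hk1
    constructor
    · rw [pvGetD_set_self _ _ _ _ (by simp; omega)]; rfl
    · rw [pvGetD_set_self _ _ _ _ (by simp; omega)]; rfl
  | succ t ih =>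
    intro hb
    have hprev := ih (by omega)
    rw [show (((2 + (t + 1) : Nat)) : Int) = ((2 + t : Nat) : Int) + 1 from by push_cast; ring,
       PySem.List.pyRange_one_succ_right (by push_cast; omega), List.foldl_append, List.foldl_cons,
       List.foldl_nil]
    have hstep := pvStep_preserves n ((2 + t : Nat) : Int) (by push_cast; omega)
      (by omega) _ (by rw [Int.toNat_natCast]; exact hprev)
    rw [Int.toNat_natCast] at hstep
    rw [show 2 + (t + 1) = 2 + t + 1 from by omega]
    exact hstep

lemma pvAlt_eq (n : Int) (hn : 1 ≤ n) : maxProductList_alt n = pvF n.toNat := by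
  have hm : PySem.Int.mod n 3 = n % 3 := PySem.Int.mod_eq_emod_of_pos (by norm_num)
  have hd1 : PySem.Int.floordiv n 3 = n / 3 := PySem.Int.floordiv_eq_ediv_of_pos (by norm_num)
  have hd2 : PySem.Int.floordiv (n - 4) 3 = (n - 4) / 3 := PySem.Int.floordiv_eq_ediv_of_pos (by norm_num)
  have hd3 : PySem.Int.floordiv (n - 2) 3 = (n - 2) / 3 := PySem.Int.floordiv_eq_ediv_of_pos (by norm_num)
  simp only [maxProductList_alt, pvF, hm, hd1, hd2, hd3]
  by_cases h4 : n ≤ 4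
  · rw [if_pos h4, if_pos (by omega : n.toNat ≤ 4)]
    congr 1
    omega
  · rw [if_neg h4, if_neg (by omega : ¬ n.toNat ≤ 4)]
    have hm3 : n % 3 = 0 ∨ n % 3 = 1 ∨ n % 3 = 2 := by omega
    rcases hm3 with h0 | h1 | h2
    · rw [if_pos h0, if_pos (by omega : n.toNat % 3 = 0)]
      congr 1
      omega
    · rw [if_neg (by omega), if_pos h1, if_neg (by omega : ¬ n.toNat % 3 = 0),
         if_pos (by omega : n.toNat % 3 = 1)]
      rw [show ((n - 4) / 3).toNat = (n.toNat - 4) / 3 from by omega]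
      rfl
    · rw [if_neg (by omega), if_neg (by omega), if_neg (by omega : ¬ n.toNat % 3 = 0),
         if_neg (by omega : ¬ n.toNat % 3 = 1)]
      rw [show ((n - 2) / 3).toNat = (n.toNat - 2) / 3 from by omega]
      rfl

-- ===== VERDICT (by name: the statement is the Claim_ definition above) =====
theorem maxProductList_spec : Claim_equal_maxProductList := by
  intro n _ hn
  have hn' : (1:Int) ≤ n := hn
  unfold Spec_maxProductList
  rw [pvAlt_eq n hn']
  show (((PySem.List.pyRange 2 (n + 1) 1).foldl pvStepA
      ((List.replicate (n + 1).toNat 0).set 1 1,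
       (List.replicate (n + 1).toNat []).set 1 [1])).2).getD n.toNat [] = pvF n.toNat
  have hb : ((n + 1 : Int)).toNat = n.toNat + 1 := by omega
  have hn1 : 1 ≤ n.toNat := by omega
  rw [hb]
  have hinv := pvFold_inv n.toNat hn1 (n.toNat - 1) (by omega)
  rw [show ((2 + (n.toNat - 1) : Nat) : Int) = n + 1 from by omega,
     show 2 + (n.toNat - 1) = n.toNat + 1 from by omega] at hinv
  obtain ⟨-, -, hk⟩ := hinv
  exact (hk n.toNat hn1 (by omega) le_rfl).2
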